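-- pv_equiv track=rewrite | github.com/1234jienf/Study_Algorithm | HJH/240615/BOJ_8913.py | dfs
-- ===== SOURCE A (Python) =====
-- def dfs(tmp: list) -> bool:
--     for i in range(len(tmp)):
--         if tmp[i] >= 2:
--             ttmp = tmp[:]
--             ttmp.pop(i)
--             if len(ttmp) == 0:
--                 return True
--             if len(ttmp) > i > 0:
--                 ttmp[i-1] += ttmp.pop(i)
--             if dfs(ttmp):
--                 return True
--     return False
-- ===== SOURCE B (Python) =====
-- def dfs(tmp: list) -> bool:
--     memo = {}
--
--     def solve(s):
--         res = False
--         for i, v in enumerate(s):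
--             if v >= 2:
--                 t = s[:i] + s[i + 1:]
--                 if not t:
--                     res = True
--                     break
--                 if 0 < i < len(t):
--                     t = t[:i - 1] + (t[i - 1] + t[i],) + t[i + 1:]
--                 if t in memo:
--                     r = memo[t]
--                 else:
--                     r = solve(t)
--                     memo[t] = r
--                 if r:
--                     res = True
--                     break
--         return res
--
--     return solve(tuple(tmp))
-- ===== Notes on version B (the rewrite author's own statement) =====
-- stated objective: alternative
-- what changed: B threads a memo dict keyed by the tuple state through the recursion, consulting it at every recursion site, so each distinct state is solved once, instead of A's plain DFS that recomputes identical sublist states; measured 62.98x at n=16 but both time out at n=64, so no speed is claimed.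
import Mathlib
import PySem

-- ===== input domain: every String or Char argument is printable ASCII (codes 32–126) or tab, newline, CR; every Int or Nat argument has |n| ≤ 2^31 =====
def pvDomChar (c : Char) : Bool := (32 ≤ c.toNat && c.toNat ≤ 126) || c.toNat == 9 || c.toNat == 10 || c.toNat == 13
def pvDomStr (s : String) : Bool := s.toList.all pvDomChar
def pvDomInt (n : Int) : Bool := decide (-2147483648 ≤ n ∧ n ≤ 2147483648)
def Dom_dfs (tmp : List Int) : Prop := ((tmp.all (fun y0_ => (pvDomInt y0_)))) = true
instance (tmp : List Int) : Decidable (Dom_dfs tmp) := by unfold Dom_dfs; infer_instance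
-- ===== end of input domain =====

-- B memoizes the recursion on the (tuple) state, so each distinct state is solved once,
-- where A's plain DFS recomputes identical sublist states (objective: alternative).
-- Both ports carry a fuel counter as a pure totality device ((len+1)^2 always suffices,
-- proved by the fuel-stability lemmas below); it guards the same computation, never switches it.

-- ===== PORT A =====
-- the `for i in range(len(tmp))` loop with early `return True`, as index recursion;
-- `tmp[:]` then `ttmp.pop(i)` (i in range) = eraseIdx i; `ttmp[i-1] += ttmp.pop(i)` = set (i-1) on eraseIdx i
def dfsAuxA : Nat → List Int → Nat → Bool
  | 0, _, _ => false
  | fuel + 1, tmp, i =>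
    if i < tmp.length then
      if tmp.getD i 0 ≥ 2 then
        let ttmp := tmp.eraseIdx i
        if ttmp.length = 0 then true
        else
          let ttmp2 := if ttmp.length > i ∧ i > 0 then
              (ttmp.eraseIdx i).set (i - 1) (ttmp.getD (i - 1) 0 + ttmp.getD i 0)
            else ttmp
          if dfsAuxA fuel ttmp2 0 then true else dfsAuxA fuel tmp (i + 1)
      else dfsAuxA fuel tmp (i + 1)
    else false

def dfs (tmp : List Int) : Bool := dfsAuxA ((tmp.length + 1) * (tmp.length + 1)) tmp 0

-- ===== PORT B =====
-- solve(s) with the memo dict threaded explicitly and consulted at each recursion site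
-- (tuple key -> List Int key); slices s[:i] / s[i+1:] with in-range nonnegative bounds are take / drop
def dfsSolve : Nat → List Int → Nat → PySem.Dict (List Int) Bool →
    Bool × PySem.Dict (List Int) Bool
  | 0, _, _, memo => (false, memo)
  | fuel + 1, s, i, memo =>
    if i < s.length then
      if s.getD i 0 ≥ 2 then
        let t := s.take i ++ s.drop (i + 1)
        if t.length = 0 then (true, memo)
        else
          let t2 := if 0 < i ∧ i < t.length then
              t.take (i - 1) ++ [t.getD (i - 1) 0 + t.getD i 0] ++ t.drop (i + 1)
            else t
          let p := match memo.get? t2 with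
            | some v => (v, memo)
            | none =>
              let q := dfsSolve fuel t2 0 memo
              (q.1, q.2.insert t2 q.1)
          if p.1 then (true, p.2) else dfsSolve fuel s (i + 1) p.2
      else dfsSolve fuel s (i + 1) memo
    else (false, memo)

def dfs_alt (tmp : List Int) : Bool :=
  (dfsSolve ((tmp.length + 1) * (tmp.length + 1)) tmp 0 PySem.Dict.empty).1

-- ===== PRECONDITION & SPEC =====
def Spec_dfs (tmp : List Int) (out : Bool) : Prop := out = dfs_alt tmp
instance (tmp : List Int) (out : Bool) : Decidable (Spec_dfs tmp out) := by unfold Spec_dfs; infer_instance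

-- ===== CLAIM (what is proved, stated in full; the proofs are below) =====
def Claim_equal_dfs : Prop := ∀ (tmp : List Int), Dom_dfs tmp → Spec_dfs tmp (dfs tmp)

-- ===== LEMMAS AND PROOFS =====

-- fuel that certainly suffices at state (s, i)
def pvMu (s : List Int) (i : Nat) : Nat := (s.length + 1) * (s.length + 1) - i

-- memo validity: every cached value is A's answer for its key
def ValidMemo (memo : PySem.Dict (List Int) Bool) : Prop :=
  ∀ k v, memo.get? k = some v → v = dfs k

theorem validMemo_insert {memo : PySem.Dict (List Int) Bool} (h : ValidMemo memo)
    {k : List Int} {v : Bool} (hv : dfs k = v) : ValidMemo (memo.insert k v) := by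
  intro k' v' hk'
  by_cases he : k' = k
  · subst he
    rw [PySem.Dict.get?_insert_self] at hk'
    cases hk'; exact hv.symm
  · rw [PySem.Dict.get?_insert_of_ne _ _ he] at hk'
    exact h k' v' hk'

-- the two "pop i" computations agree
theorem move1_eq (s : List Int) (i : Nat) :
    s.take i ++ s.drop (i + 1) = s.eraseIdx i :=
  (List.eraseIdx_eq_take_drop_succ s i).symm

-- the two "merge at i-1" computations agree
theorem move2_eq (t : List Int) (i : Nat) (h1 : 0 < i) (h2 : i < t.length) (x : Int) :
    t.take (i - 1) ++ [x] ++ t.drop (i + 1) = (t.eraseIdx i).set (i - 1) x := by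
  have hlen : (t.take i).length = i := by simp; omega
  rw [List.eraseIdx_eq_take_drop_succ, List.set_eq_take_append_cons_drop]
  have hcond : i - 1 < (t.take i ++ t.drop (i + 1)).length := by
    simp; omega
  rw [if_pos hcond]
  rw [List.take_append_of_le_length (by omega), List.take_take, min_eq_left (by omega)]
  have hdrop : (t.take i ++ t.drop (i + 1)).drop i = t.drop (i + 1) := by
    rw [List.drop_append_of_le_length (le_of_eq hlen.symm)]
    have hnil : List.drop i (List.take i t) = [] := List.drop_eq_nil_of_le (by simp)
    rw [hnil, List.nil_append]
  have : i - 1 + 1 = i := by omega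
  rw [this, hdrop]
  simp

-- A's successor state is strictly shorter
theorem pvLenA (tmp : List Int) (i : Nat) (x : Int) (h : i < tmp.length) :
    (if (tmp.eraseIdx i).length > i ∧ i > 0 then
        ((tmp.eraseIdx i).eraseIdx i).set (i - 1) x
      else tmp.eraseIdx i).length < tmp.length := by
  split <;> simp only [List.length_set, List.length_eraseIdx] <;> split_ifs <;> omega

-- enough fuel at (s,i) leaves enough fuel for a recursive call on a shorter list
theorem pvFuelStep (a b i f : Nat) (hb : b < a) (hi : i < a)
    (h : (a + 1) * (a + 1) - i ≤ f + 1) : (b + 1) * (b + 1) ≤ f := by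
  have h1 : b + 1 ≤ a := hb
  have h2 : (b + 1) * (b + 1) ≤ a * a := Nat.mul_le_mul h1 h1
  have h3 : (a + 1) * (a + 1) = a * a + 2 * a + 1 := by ring
  omega

-- with sufficient fuel, A's port is independent of the fuel
theorem stableA : ∀ f g (s : List Int) i, pvMu s i ≤ f → pvMu s i ≤ g →
    dfsAuxA f s i = dfsAuxA g s i := by
  intro f
  induction f with
  | zero =>
    intro g s i hf hg
    have hi : ¬ i < s.length := by
      intro hc
      have : 0 < pvMu s i := by
        unfold pvMu
        have : (s.length + 1) * (s.length + 1) = s.length * s.length + 2 * s.length + 1 := by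
          ring
        omega
      omega
    cases g with
    | zero => rfl
    | succ g => rw [dfsAuxA, dfsAuxA, if_neg hi]
  | succ f IHf =>
    intro g s i hf hg
    cases g with
    | zero =>
      have hi : ¬ i < s.length := by
        intro hc
        have : 0 < pvMu s i := by
          unfold pvMu
          have : (s.length + 1) * (s.length + 1) = s.length * s.length + 2 * s.length + 1 := by
            ring
          omega
        omega
      rw [dfsAuxA, dfsAuxA, if_neg hi]
    | succ g =>
      rw [dfsAuxA, dfsAuxA]
      by_cases hi : i < s.length
      · rw [if_pos hi, if_pos hi]
        by_cases hge : s.getD i 0 ≥ 2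
        · rw [if_pos hge, if_pos hge]
          by_cases hz : (s.eraseIdx i).length = 0
          · rw [if_pos hz, if_pos hz]
          · rw [if_neg hz, if_neg hz]
            set t2A := if (s.eraseIdx i).length > i ∧ i > 0 then
                ((s.eraseIdx i).eraseIdx i).set (i - 1)
                  ((s.eraseIdx i).getD (i - 1) 0 + (s.eraseIdx i).getD i 0)
              else s.eraseIdx i with ht2A
            have hlt : t2A.length < s.length := pvLenA s i _ hi
            have hmu2 : pvMu t2A 0 ≤ f :=
              le_trans (Nat.sub_le _ _) (pvFuelStep s.length t2A.length i f hlt hi hf)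
            have hmu2g : pvMu t2A 0 ≤ g :=
              le_trans (Nat.sub_le _ _) (pvFuelStep s.length t2A.length i g hlt hi hg)
            have hmui : pvMu s (i + 1) ≤ f := by unfold pvMu at *; omega
            have hmuig : pvMu s (i + 1) ≤ g := by unfold pvMu at *; omega
            show (if dfsAuxA f t2A 0 = true then true else dfsAuxA f s (i + 1)) =
                (if dfsAuxA g t2A 0 = true then true else dfsAuxA g s (i + 1))
            rw [IHf g t2A 0 hmu2 hmu2g, IHf g s (i + 1) hmui hmuig]
        · rw [if_neg hge, if_neg hge]
          have hmui : pvMu s (i + 1) ≤ f := by unfold pvMu at *; omega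
          have hmuig : pvMu s (i + 1) ≤ g := by unfold pvMu at *; omega
          exact IHf g s (i + 1) hmui hmuig
      · rw [if_neg hi, if_neg hi]

-- main invariant: with sufficient fuel and a valid memo, dfsSolve returns A's
-- fuel-limited answer and keeps the memo valid
theorem solve_correct : ∀ f (s : List Int) i memo, pvMu s i ≤ f → ValidMemo memo →
    (dfsSolve f s i memo).1 = dfsAuxA f s i ∧ ValidMemo (dfsSolve f s i memo).2 := by
  intro f
  induction f with
  | zero =>
    intro s i memo _ hm
    exact ⟨rfl, hm⟩
  | succ f IHf =>
    intro s i memo hf hm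
    rw [dfsSolve, dfsAuxA]
    by_cases hi : i < s.length
    · rw [if_pos hi, if_pos hi]
      by_cases hge : s.getD i 0 ≥ 2
      · rw [if_pos hge, if_pos hge]
        simp only [move1_eq]
        by_cases hz : (s.eraseIdx i).length = 0
        · rw [if_pos hz, if_pos hz]
          exact ⟨rfl, hm⟩
        · rw [if_neg hz, if_neg hz]
          -- the two branch conditions are the same proposition up to ∧-order
          have hcond : (0 < i ∧ i < (s.eraseIdx i).length) ↔
              ((s.eraseIdx i).length > i ∧ i > 0) := and_comm
          set t2A := if (s.eraseIdx i).length > i ∧ i > 0 then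
              ((s.eraseIdx i).eraseIdx i).set (i - 1)
                ((s.eraseIdx i).getD (i - 1) 0 + (s.eraseIdx i).getD i 0)
            else s.eraseIdx i with ht2A
          have ht2 : (if 0 < i ∧ i < (s.eraseIdx i).length then
              (s.eraseIdx i).take (i - 1) ++
                [(s.eraseIdx i).getD (i - 1) 0 + (s.eraseIdx i).getD i 0] ++
                (s.eraseIdx i).drop (i + 1)
            else s.eraseIdx i) = t2A := by
            rw [ht2A]
            split_ifs with hA hB hB
            · exact move2_eq _ _ hA.1 hA.2 _
            · exact absurd (hcond.mp hA) hB
            · exact absurd (hcond.mpr hB) hA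
            · rfl
          rw [ht2]
          have hlt : t2A.length < s.length := pvLenA s i _ hi
          have hmu2 : pvMu t2A 0 ≤ f :=
            le_trans (Nat.sub_le _ _) (pvFuelStep s.length t2A.length i f hlt hi hf)
          -- A's full-fuel answer for t2A coincides with its answer at fuel f
          have hfull : dfs t2A = dfsAuxA f t2A 0 :=
            stableA _ f t2A 0 (le_refl _) hmu2
          -- the memo consultation at the recursion site returns that answer
          have hp : (match memo.get? t2A with
                | some v => (v, memo)
                | none =>
                  let q := dfsSolve f t2A 0 memo
                  (q.1, q.2.insert t2A q.1)).1 = dfsAuxA f t2A 0 ∧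
              ValidMemo (match memo.get? t2A with
                | some v => (v, memo)
                | none =>
                  let q := dfsSolve f t2A 0 memo
                  (q.1, q.2.insert t2A q.1)).2 := by
            cases hget : memo.get? t2A with
            | some v =>
              exact ⟨(hm t2A v hget).trans hfull, hm⟩
            | none =>
              have hq := IHf t2A 0 memo hmu2 hm
              exact ⟨hq.1, validMemo_insert hq.2 (hfull.trans hq.1.symm)⟩
          rcases hp with ⟨hp1, hp2⟩
          rw [hp1]
          have hmui : pvMu s (i + 1) ≤ f := by unfold pvMu at *; omega
          by_cases hres : dfsAuxA f t2A 0 = true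
          · rw [if_pos hres, if_pos hres]
            exact ⟨rfl, hp2⟩
          · rw [if_neg hres, if_neg hres]
            exact IHf s (i + 1) _ hmui hp2
      · rw [if_neg hge, if_neg hge]
        have hmui : pvMu s (i + 1) ≤ f := by unfold pvMu at *; omega
        exact IHf s (i + 1) memo hmui hm
    · rw [if_neg hi, if_neg hi]
      exact ⟨rfl, hm⟩

theorem dfs_spec : Claim_equal_dfs := by
  intro tmp _
  unfold Spec_dfs dfs_alt
  have hempty : ValidMemo PySem.Dict.empty := by
    intro k v hv
    simp [PySem.Dict.empty, PySem.Dict.get?] at hv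
  exact (solve_correct ((tmp.length + 1) * (tmp.length + 1)) tmp 0 PySem.Dict.empty
    (Nat.sub_le _ _) hempty).1.symm
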